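-- pv_equiv track=rewrite | github.com/Sanspeen/Estadistic_project | Functions.py | filter_by_variable_bool
-- ===== SOURCE A (Python) =====
-- def filter_by_variable_bool(data_base, name_of_variable):
--     filtered_variables_is_working = []
--     filtered_variables_is_not_working = []
--     for i in range(0, len(data_base)):
--         if data_base[i].get(name_of_variable):
--             filtered_variables_is_working.append(data_base[i])
--
--     for j in range(0, len(data_base)):
--         if not data_base[j].get(name_of_variable):
--             filtered_variables_is_not_working.append(data_base[j])
--
--     return filtered_variables_is_working, filtered_variables_is_not_working
-- ===== SOURCE B (Python) =====
-- def filter_by_variable_bool(data_base, name_of_variable):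
--     working = []
--     not_working = []
--     for record in data_base:
--         if record.get(name_of_variable):
--             working.append(record)
--         else:
--             not_working.append(record)
--     return working, not_working
-- ===== Notes on version B (the rewrite author's own statement) =====
-- stated objective: simpler
-- what changed: Replaces A's two index-based full scans (one per partition) with a single direct pass over the records that appends each record to the working or not-working list as it is seen.
import Mathlib
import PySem

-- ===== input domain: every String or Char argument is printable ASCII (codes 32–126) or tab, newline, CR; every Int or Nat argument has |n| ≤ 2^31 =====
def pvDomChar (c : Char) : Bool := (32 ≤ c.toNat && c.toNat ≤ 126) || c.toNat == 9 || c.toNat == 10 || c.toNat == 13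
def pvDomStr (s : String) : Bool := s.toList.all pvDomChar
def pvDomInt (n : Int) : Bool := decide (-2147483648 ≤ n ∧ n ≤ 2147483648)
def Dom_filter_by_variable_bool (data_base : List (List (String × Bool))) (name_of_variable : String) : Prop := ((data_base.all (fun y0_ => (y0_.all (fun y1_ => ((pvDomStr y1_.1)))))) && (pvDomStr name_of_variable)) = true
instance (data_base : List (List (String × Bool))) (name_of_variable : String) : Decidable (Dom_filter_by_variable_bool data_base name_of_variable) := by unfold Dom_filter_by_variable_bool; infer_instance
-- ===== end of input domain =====

-- B replaces A's two index-based full scans with one direct pass that routes each record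
-- to the working or not-working list; objective: simpler.

-- ===== PORT A =====
-- two loops over range(0, len(data_base)); 'if d.get(name)' is truthy iff the lookup yields True
def filter_by_variable_bool (data_base : List (List (String × Bool))) (name_of_variable : String) : (List (List (String × Bool))) × (List (List (String × Bool))) :=
  let working := (PySem.List.pyRange 0 (PySem.List.len data_base) 1).foldl
    (fun acc i =>
      if PySem.Dict.get? (PySem.Dict.mk (PySem.List.pyGetD data_base i [])) name_of_variable = some true
      then acc ++ [PySem.List.pyGetD data_base i []] else acc) []
  let not_working := (PySem.List.pyRange 0 (PySem.List.len data_base) 1).foldl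
    (fun acc j =>
      if ¬ (PySem.Dict.get? (PySem.Dict.mk (PySem.List.pyGetD data_base j [])) name_of_variable = some true)
      then acc ++ [PySem.List.pyGetD data_base j []] else acc) []
  (working, not_working)

-- ===== PORT B =====
-- single pass: route each record into one of the two accumulating lists
def pvAltGo (name_of_variable : String) : List (List (String × Bool)) → (List (List (String × Bool))) × (List (List (String × Bool)))
  | [] => ([], [])
  | r :: rest =>
    let p := pvAltGo name_of_variable rest
    if PySem.Dict.get? (PySem.Dict.mk r) name_of_variable = some true then (r :: p.1, p.2) else (p.1, r :: p.2)

def filter_by_variable_bool_alt (data_base : List (List (String × Bool))) (name_of_variable : String) : (List (List (String × Bool))) × (List (List (String × Bool))) :=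
  pvAltGo name_of_variable data_base

-- ===== PRECONDITION & SPEC =====
def Spec_filter_by_variable_bool (data_base : List (List (String × Bool))) (name_of_variable : String) (out : (List (List (String × Bool))) × (List (List (String × Bool)))) : Prop := out = filter_by_variable_bool_alt data_base name_of_variable
instance (data_base : List (List (String × Bool))) (name_of_variable : String) (out : (List (List (String × Bool))) × (List (List (String × Bool)))) : Decidable (Spec_filter_by_variable_bool data_base name_of_variable out) := by unfold Spec_filter_by_variable_bool; infer_instance

-- ===== CLAIM (what is proved, stated in full; the proofs are below) =====
def Claim_equal_filter_by_variable_bool : Prop := ∀ (data_base : List (List (String × Bool))) (name_of_variable : String), Dom_filter_by_variable_bool data_base name_of_variable → Spec_filter_by_variable_bool data_base name_of_variable (filter_by_variable_bool data_base name_of_variable)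

-- ===== LEMMAS AND PROOFS =====

theorem pvAltGo_eq_filters (name : String) (l : List (List (String × Bool))) :
    pvAltGo name l =
      (l.filter (fun r => PySem.Dict.get? (PySem.Dict.mk r) name = some true),
       l.filter (fun r => ¬ (PySem.Dict.get? (PySem.Dict.mk r) name = some true))) := by
  induction l with
  | nil => rfl
  | cons r rest ih =>
    simp only [pvAltGo, ih, List.filter_cons]
    by_cases h : PySem.Dict.get? (PySem.Dict.mk r) name = some true <;> simp [h]

-- ===== VERDICT (by name: the statement is the Claim_ definition above) =====
theorem filter_by_variable_bool_spec : Claim_equal_filter_by_variable_bool := by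
  intro db name _
  show filter_by_variable_bool db name = filter_by_variable_bool_alt db name
  unfold filter_by_variable_bool filter_by_variable_bool_alt
  rw [pvAltGo_eq_filters]
  rw [PySem.List.foldl_pyRange_zero_pyGetD db []
        (fun acc r => if PySem.Dict.get? (PySem.Dict.mk r) name = some true then acc ++ [r] else acc) [],
      PySem.List.foldl_pyRange_zero_pyGetD db []
        (fun acc r => if ¬ (PySem.Dict.get? (PySem.Dict.mk r) name = some true) then acc ++ [r] else acc) [],
      PySem.List.foldl_append_ite_eq_filter, PySem.List.foldl_append_ite_eq_filter]
  simp
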